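/- GENERATED by farm/mkstatement.py from design/units.tsv (unit `start_decoder.C13d`) and the assertions of Vorbis/Spec/StartDecoderC13.lean — do not edit.
   THE STATEMENT of the proof unit `start_decoder.C13d`: segment C13d of `start_decoder` (29 instructions; entries 0x114fe7;
   exits 0x113b22,0x114f32; ranges 0x114f19-0x114f2c + 0x114fe7-0x115021 + 0x115027-0x115049)
   takes each of its entry assertions to one of its exit assertions (`Vorbis.Spec.StartDecoder.SegC13d`), given the contracts of its callees.
   What the names mean: Vorbis/Spec/Basic.lean (the shared hypotheses), Vorbis/Spec/StartDecoderC13.lean (the assertions). The theorem to prove: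
   `theorem start_decoder_C13d_ok : Vorbis.Spec.start_decoder_C13d.Statement`. -/
import Vorbis.Spec.Alloc
import Vorbis.Spec.Leaves
import Vorbis.Spec.StartDecoderC13
namespace Vorbis.Spec.start_decoder_C13d
open X86 X86.User Asan

/-- The statement of unit `start_decoder.C13d`. -/
def Statement : Prop :=
  ∀ (Lay : Layout) (_hLay : Lay.hi = 0x1000000) (μ : Microarch) (_hμ : UserX.MicroOK μ) (u₀ : State)
    (_hcode : HasCodeNat Lay u₀ Vorbis.L.start_decoder.entry Vorbis.Code.code_start_decoder.nat Vorbis.L.start_decoder.size)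
    (_h_asan_load1_noabort : Asan.SmallCheck Lay μ Vorbis.WayInv (Vorbis.CodeOK u₀) [.rax, .rdx] 1 Vorbis.L.__asan_load1_noabort.entry)
    (_h_setup_temp_free : ∀ (others : List Obj) (frames : List (Nat × FrameLayout)) (A : Arena) (m : Nat) (rest : List (Nat × Nat)), Calls Lay μ Vorbis.WayInv (Vorbis.conv u₀) Vorbis.L.setup_temp_free.entry (Vorbis.Spec.setup_temp_free.spec others frames A m rest))
    (_h_error : ∀ (others : List Obj) (frames : List (Nat × FrameLayout)), Calls Lay μ Vorbis.WayInv (Vorbis.conv u₀) Vorbis.L.error.entry (Vorbis.Spec.error.spec others frames)),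
    Vorbis.Spec.StartDecoder.SegC13d Lay μ u₀

end Vorbis.Spec.start_decoder_C13d
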